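-- pv_equiv track=rewrite | github.com/AshokGaire3/applied-ai-system-project | rag_engine.py | _resolve_entries_by_ids
-- ===== SOURCE A (Python) =====
-- from typing import Dict, List, Optional, Tuple
--
-- def _resolve_entries_by_ids(
--     entries: List[Dict[str, str]],
--     ids_in_order: List[str],
-- ) -> List[Dict[str, str]]:
--     by_id = {entry.get("id"): entry for entry in entries}
--     resolved: List[Dict[str, str]] = []
--     for eid in ids_in_order:
--         match = by_id.get(eid)
--         if match is not None:
--             resolved.append(match)
--     return resolved
-- ===== SOURCE B (Python) =====
-- def _resolve_entries_by_ids(entries, ids_in_order):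
--     slots = [None] * len(ids_in_order)
--     for entry in entries:
--         eid = entry.get("id")
--         for pos, want in enumerate(ids_in_order):
--             if want == eid:
--                 slots[pos] = entry
--     return [s for s in slots if s is not None]
-- ===== Notes on version B (the rewrite author's own statement) =====
-- stated objective: alternative
-- what changed: Inverts the structure: instead of building an id->entry dict and looking ids up, B makes a single pass over entries filling a slot table aligned with ids_in_order (later entries overwrite, giving last-wins), then filters out empty slots.
import Mathlib
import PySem

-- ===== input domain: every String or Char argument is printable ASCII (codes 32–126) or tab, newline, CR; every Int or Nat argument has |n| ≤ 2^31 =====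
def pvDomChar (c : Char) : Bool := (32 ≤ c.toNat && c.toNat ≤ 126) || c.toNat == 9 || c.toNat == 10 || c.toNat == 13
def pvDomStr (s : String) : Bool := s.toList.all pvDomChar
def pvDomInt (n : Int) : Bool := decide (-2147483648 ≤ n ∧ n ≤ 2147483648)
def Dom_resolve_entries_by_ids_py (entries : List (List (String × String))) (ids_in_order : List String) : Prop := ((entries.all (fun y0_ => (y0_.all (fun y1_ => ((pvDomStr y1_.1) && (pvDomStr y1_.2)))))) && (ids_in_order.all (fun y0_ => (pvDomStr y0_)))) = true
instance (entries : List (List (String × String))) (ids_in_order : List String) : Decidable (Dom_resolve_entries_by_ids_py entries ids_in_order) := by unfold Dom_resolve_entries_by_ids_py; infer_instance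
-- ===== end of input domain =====

-- B inverts the structure: one pass over entries filling a slot table aligned with ids_in_order
-- (later entries overwrite = last-wins), then the unfilled slots are dropped; no dict is built.

-- entry.get("id") on a Python dict (association list, first match wins)
def pvGetId (entry : List (String × String)) : Option String :=
  (PySem.Dict.mk entry).get? "id"

-- ===== PORT A =====
def resolve_entries_by_ids_py (entries : List (List (String × String))) (ids_in_order : List String) : List (List (String × String)) :=
  -- by_id = {entry.get("id"): entry for entry in entries}
  let by_id : PySem.Dict (Option String) (List (String × String)) :=
    entries.foldl (fun d entry => d.insert (pvGetId entry) entry) PySem.Dict.empty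
  -- for eid in ids_in_order: match = by_id.get(eid); if match is not None: resolved.append(match)
  ids_in_order.foldl (fun resolved eid =>
    match by_id.get? (some eid) with
    | some m => resolved ++ [m]
    | none => resolved) []

-- ===== PORT B =====
def resolve_entries_by_ids_py_alt (entries : List (List (String × String))) (ids_in_order : List String) : List (List (String × String)) :=
  -- slots = [None] * len(ids_in_order)
  -- for entry in entries: eid = entry.get("id"); for pos, want in enumerate(ids_in_order): if want == eid: slots[pos] = entry
  let slots : List (Option (List (String × String))) :=
    entries.foldl (fun slots entry =>
      let eid := pvGetId entry
      List.zipWith (fun want s => if some want == eid then some entry else s) ids_in_order slots)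
      (List.replicate ids_in_order.length none)
  -- return [s for s in slots if s is not None]
  slots.filterMap id

-- ===== PRECONDITION & SPEC =====
def Spec_resolve_entries_by_ids_py (entries : List (List (String × String))) (ids_in_order : List String) (out : List (List (String × String))) : Prop := out = resolve_entries_by_ids_py_alt entries ids_in_order
instance (entries : List (List (String × String))) (ids_in_order : List String) (out : List (List (String × String))) : Decidable (Spec_resolve_entries_by_ids_py entries ids_in_order out) := by unfold Spec_resolve_entries_by_ids_py; infer_instance

-- ===== CLAIM (what is proved, stated in full; the proofs are below) =====
def Claim_equal_resolve_entries_by_ids_py : Prop := ∀ (entries : List (List (String × String))) (ids_in_order : List String), Dom_resolve_entries_by_ids_py entries ids_in_order → Spec_resolve_entries_by_ids_py entries ids_in_order (resolve_entries_by_ids_py entries ids_in_order)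

-- ===== LEMMAS AND PROOFS =====

-- ===== VERDICT (by name: the statement is the Claim_ definition above) =====
-- lookup in the insert-folded dict = first match scanning the entries back to front
theorem get?_foldl_insert_eq_find
    (entries : List (List (String × String)))
    (d : PySem.Dict (Option String) (List (String × String))) (k : Option String) :
    (entries.foldl (fun d entry => d.insert (pvGetId entry) entry) d).get? k
      = (entries.reverse.find? (fun e => pvGetId e == k)).or (d.get? k) := by
  induction entries generalizing d with
  | nil => simp
  | cons e rest ih =>
    simp only [List.foldl_cons, List.reverse_cons, List.find?_append, ih]
    cases h : rest.reverse.find? (fun e => pvGetId e == k) with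
    | some m => simp [Option.or]
    | none =>
      simp only [Option.or, List.find?_cons, List.find?_nil]
      rw [PySem.Dict.get?_insert]
      by_cases hk : k = pvGetId e
      · simp [hk]
      · have : (pvGetId e == k) = false := by
          simp only [beq_eq_false_iff_ne]; exact fun h' => hk h'.symm
        simp [hk, this]

-- pointwise update of a slot table built by map
theorem zipWith_map_self {α β γ : Type} (g : α → β → γ) (f : α → β) (l : List α) :
    List.zipWith (fun a b => g a b) l (l.map f) = l.map (fun a => g a (f a)) := by
  induction l with
  | nil => rfl
  | cons x xs ih => simp [ih]

-- the slot table after the fold over entries: each slot holds the last matching entry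
theorem slots_foldl_eq_map
    (entries : List (List (String × String))) (ids : List String)
    (f : String → Option (List (String × String))) :
    entries.foldl (fun slots entry =>
        List.zipWith (fun want s => if some want == pvGetId entry then some entry else s) ids slots)
      (ids.map f)
    = ids.map (fun want => (entries.reverse.find? (fun e => pvGetId e == some want)).or (f want)) := by
  induction entries generalizing f with
  | nil => simp [Option.or]
  | cons e rest ih =>
    simp only [List.foldl_cons]
    rw [zipWith_map_self, ih]
    apply List.map_congr_left
    intro w _
    simp only [List.reverse_cons, List.find?_append, List.find?_cons, List.find?_nil]
    cases h : rest.reverse.find? (fun x => pvGetId x == some w) with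
    | some m => simp [Option.or]
    | none =>
      by_cases he : pvGetId e = some w
      · simp [Option.or, he]
      · have h1 : (pvGetId e == some w) = false := by simp [he]
        have h2 : (some w == pvGetId e) = false := by
          simp only [beq_eq_false_iff_ne]; exact fun h' => he h'.symm
        simp [Option.or, h1, h2]

theorem resolve_eq (entries : List (List (String × String))) (ids : List String) :
    resolve_entries_by_ids_py entries ids = resolve_entries_by_ids_py_alt entries ids := by
  unfold resolve_entries_by_ids_py resolve_entries_by_ids_py_alt
  have hrep : (List.replicate ids.length (none : Option (List (String × String))))
      = ids.map (fun _ => none) := by simp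
  rw [hrep, slots_foldl_eq_map, List.filterMap_map]
  have hget : ∀ eid : String,
      (entries.foldl (fun d entry => d.insert (pvGetId entry) entry) PySem.Dict.empty).get? (some eid)
        = entries.reverse.find? (fun e => pvGetId e == some eid) := by
    intro eid
    rw [get?_foldl_insert_eq_find]
    cases entries.reverse.find? (fun e => pvGetId e == some eid) <;>
      simp [PySem.Dict.get?_empty, Option.or]
  simp only [hget]
  have key : ∀ (l : List String) (acc : List (List (String × String))),
      l.foldl (fun resolved eid =>
          match entries.reverse.find? (fun e => pvGetId e == some eid) with
          | some m => resolved ++ [m]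
          | none => resolved) acc
        = acc ++ l.filterMap (fun want => entries.reverse.find? (fun e => pvGetId e == some want)) := by
    intro l
    induction l with
    | nil => simp
    | cons w ws ihw =>
      intro acc
      simp only [List.foldl_cons, List.filterMap_cons]
      cases h : entries.reverse.find? (fun e => pvGetId e == some w) <;> simp [ihw]
  rw [key ids []]
  simp only [List.nil_append, Option.or, Function.comp, id]
  congr 1
  funext x
  cases List.find? (fun e => pvGetId e == some x) entries.reverse <;> rfl

-- ===== VERDICT (by name: the statement is the Claim_ definition above) =====
theorem resolve_entries_by_ids_py_spec : Claim_equal_resolve_entries_by_ids_py := by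
  intro entries ids _
  exact resolve_eq entries ids
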